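-- pv_equiv track=rewrite | github.com/gks3075/baekjoon | 프로그래머스/unrated/181893. 배열 조각하기/배열 조각하기.py | solution
-- ===== SOURCE A (Python) =====
-- def solution(arr, query):
--     answer = []
--     for i in range(len(query)):
--         if i % 2 == 1:
--             arr = arr[query[i]:]
--
--         else:
--             arr = arr[:query[i] + 1]
--
--     return arr
-- ===== SOURCE B (Python) =====
-- def solution(arr, query):
--     lo, hi = 0, len(arr)
--     for i, q in enumerate(query):
--         n = hi - lo
--         if i % 2 == 1:
--             s = q + n if q < 0 else q
--             lo += min(max(s, 0), n)
--         else: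
--             t = q + 1
--             t = t + n if t < 0 else t
--             hi = lo + min(max(t, 0), n)
--     return arr[lo:hi]
-- ===== Notes on version B (the rewrite author's own statement) =====
-- stated objective: alternative
-- what changed: Instead of materializing a new sliced list per query, B tracks integer window bounds (lo, hi) across all queries with Python's slice-clamping arithmetic and slices the original array once at the end; it avoids per-query list copies but is not measurably faster in CPython.
import Mathlib
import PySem

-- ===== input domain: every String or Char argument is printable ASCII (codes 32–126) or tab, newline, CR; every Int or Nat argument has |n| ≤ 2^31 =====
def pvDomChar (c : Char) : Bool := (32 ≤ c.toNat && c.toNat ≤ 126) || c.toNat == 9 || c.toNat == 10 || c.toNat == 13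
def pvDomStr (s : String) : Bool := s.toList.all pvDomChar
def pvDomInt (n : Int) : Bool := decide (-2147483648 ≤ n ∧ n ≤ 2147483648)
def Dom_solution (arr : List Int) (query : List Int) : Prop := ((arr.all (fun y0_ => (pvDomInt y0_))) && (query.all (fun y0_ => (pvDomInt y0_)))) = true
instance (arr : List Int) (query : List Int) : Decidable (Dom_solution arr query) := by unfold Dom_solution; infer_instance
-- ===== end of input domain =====

-- B tracks integer window bounds (lo, hi) through the queries and slices the original array once at the end, instead of materializing a new list per query (objective: alternative).

-- ===== PORT A =====
-- (A's 'answer = []' is never used; the loop re-slices arr per query index.)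
def solution (arr : List Int) (query : List Int) : List Int :=
  (PySem.List.pyRange 0 (query.length : Int) 1).foldl
    (fun a i =>
      if PySem.Int.mod i 2 = 1 then
        PySem.List.slice a (some (PySem.List.pyGetD query i 0)) none
      else
        PySem.List.slice a none (some (PySem.List.pyGetD query i 0 + 1)))
    arr

-- ===== PORT B =====
def solution_alt (arr : List Int) (query : List Int) : List Int :=
  let p := (PySem.List.enumerate query 0).foldl
    (fun (st : Int × Int) iq =>
      let n := st.2 - st.1
      if PySem.Int.mod iq.1 2 = 1 then
        let s := if iq.2 < 0 then iq.2 + n else iq.2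
        (st.1 + min (max s 0) n, st.2)
      else
        let t := iq.2 + 1
        let t' := if t < 0 then t + n else t
        (st.1, st.1 + min (max t' 0) n))
    (0, (arr.length : Int))
  PySem.List.slice arr (some p.1) (some p.2)

-- ===== PRECONDITION & SPEC =====
def Spec_solution (arr : List Int) (query : List Int) (out : List Int) : Prop := out = solution_alt arr query
instance (arr : List Int) (query : List Int) (out : List Int) : Decidable (Spec_solution arr query out) := by unfold Spec_solution; infer_instance

-- ===== CLAIM (what is proved, stated in full; the proofs are below) =====
def Claim_equal_solution : Prop := ∀ (arr : List Int) (query : List Int), Dom_solution arr query → Spec_solution arr query (solution arr query)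

-- ===== LEMMAS AND PROOFS =====

-- A's loop body, after replacing query[i] by the enumerated element
def stepA : List Int → Int × Int → List Int := fun a iq =>
  if PySem.Int.mod iq.1 2 = 1 then
    PySem.List.slice a (some iq.2) none
  else
    PySem.List.slice a none (some (iq.2 + 1))

-- B's loop body
def stepB : Int × Int → Int × Int → Int × Int := fun st iq =>
  let n := st.2 - st.1
  if PySem.Int.mod iq.1 2 = 1 then
    let s := if iq.2 < 0 then iq.2 + n else iq.2
    (st.1 + min (max s 0) n, st.2)
  else
    let t := iq.2 + 1
    let t' := if t < 0 then t + n else t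
    (st.1, st.1 + min (max t' 0) n)

-- B's Int-valued clamp of an index into a window of length n
def clampI (n q : Int) : Int := min (max (if q < 0 then q + n else q) 0) n

lemma clampI_eq (n : Nat) (q : Int) : clampI (n : Int) q = (PySem.List.clampIdx n q : Int) := by
  simp only [clampI, PySem.List.clampIdx]
  split_ifs <;> omega

lemma clampI_nonneg (n q : Int) (hn : 0 ≤ n) : 0 ≤ clampI n q := by
  simp only [clampI]; omega

lemma clampI_le (n q : Int) (_hn : 0 ≤ n) : clampI n q ≤ n := by
  simp only [clampI]; omega

lemma slice_none_some {α : Type} (xs : List α) (b : Int) :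
    PySem.List.slice xs none (some b) = xs.take (PySem.List.clampIdx xs.length b) := by
  simp [PySem.List.slice]

lemma slice_full {α : Type} (xs : List α) :
    PySem.List.slice xs (some 0) (some (xs.length : Int)) = xs := by
  simp only [PySem.List.slice, PySem.List.clampIdx]
  split_ifs <;> simp <;> omega

lemma cur_repr (arr : List Int) (lo hi : Int) (h0 : 0 ≤ lo) (h1 : lo ≤ hi)
    (h2 : hi ≤ (arr.length : Int)) :
    PySem.List.slice arr (some lo) (some hi) = (arr.drop lo.toNat).take (hi.toNat - lo.toNat) :=
  PySem.List.slice_of_nonneg arr h0 (le_trans h0 h1) (le_trans h1 h2) h2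

lemma cur_length (arr : List Int) (lo hi : Int) (h0 : 0 ≤ lo) (h1 : lo ≤ hi)
    (h2 : hi ≤ (arr.length : Int)) :
    (PySem.List.slice arr (some lo) (some hi)).length = hi.toNat - lo.toNat := by
  rw [cur_repr arr lo hi h0 h1 h2]
  simp [List.length_take, List.length_drop]
  omega

lemma step_odd (arr : List Int) (lo hi q : Int) (h0 : 0 ≤ lo) (h1 : lo ≤ hi)
    (h2 : hi ≤ (arr.length : Int)) :
    PySem.List.slice (PySem.List.slice arr (some lo) (some hi)) (some q) none
      = PySem.List.slice arr (some (lo + clampI (hi - lo) q)) (some hi) := by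
  have hlen := cur_length arr lo hi h0 h1 h2
  rw [PySem.List.slice_some_none, hlen]
  set k := PySem.List.clampIdx (hi.toNat - lo.toNat) q with hk
  have hkle : k ≤ hi.toNat - lo.toNat := PySem.List.clampIdx_le _ _
  have hcl : clampI (hi - lo) q = (k : Int) := by
    have : hi - lo = ((hi.toNat - lo.toNat : Nat) : Int) := by omega
    rw [this, clampI_eq]
  rw [hcl, cur_repr arr lo hi h0 h1 h2,
      cur_repr arr (lo + (k : Int)) hi (by omega) (by omega) h2]
  rw [List.drop_take, List.drop_drop]
  congr 1
  · omega
  · congr 1; omega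

lemma step_even (arr : List Int) (lo hi b : Int) (h0 : 0 ≤ lo) (h1 : lo ≤ hi)
    (h2 : hi ≤ (arr.length : Int)) :
    PySem.List.slice (PySem.List.slice arr (some lo) (some hi)) none (some b)
      = PySem.List.slice arr (some lo) (some (lo + clampI (hi - lo) b)) := by
  have hlen := cur_length arr lo hi h0 h1 h2
  rw [slice_none_some, hlen]
  set k := PySem.List.clampIdx (hi.toNat - lo.toNat) b with hk
  have hkle : k ≤ hi.toNat - lo.toNat := PySem.List.clampIdx_le _ _
  have hcl : clampI (hi - lo) b = (k : Int) := by
    have : hi - lo = ((hi.toNat - lo.toNat : Nat) : Int) := by omega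
    rw [this, clampI_eq]
  rw [hcl, cur_repr arr lo hi h0 h1 h2,
      cur_repr arr lo (lo + (k : Int)) h0 (by omega) (by omega)]
  rw [List.take_take]
  congr 1
  omega

lemma loop_eq (qs : List Int) : ∀ (s : Int) (arr : List Int) (lo hi : Int),
    0 ≤ lo → lo ≤ hi → hi ≤ (arr.length : Int) →
    (PySem.List.enumerate qs s).foldl stepA (PySem.List.slice arr (some lo) (some hi))
      = PySem.List.slice arr (some ((PySem.List.enumerate qs s).foldl stepB (lo, hi)).1)
          (some ((PySem.List.enumerate qs s).foldl stepB (lo, hi)).2) := by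
  induction qs with
  | nil => intro s arr lo hi h0 h1 h2; simp [PySem.List.enumerate_nil]
  | cons q qs ih =>
    intro s arr lo hi h0 h1 h2
    rw [PySem.List.enumerate_cons]
    simp only [List.foldl_cons]
    have hn : (0 : Int) ≤ hi - lo := by omega
    by_cases hpar : PySem.Int.mod s 2 = 1
    · have hA : stepA (PySem.List.slice arr (some lo) (some hi)) (s, q)
          = PySem.List.slice arr (some (lo + clampI (hi - lo) q)) (some hi) := by
        simp only [stepA, hpar, if_pos]
        exact step_odd arr lo hi q h0 h1 h2
      have hB : stepB (lo, hi) (s, q) = (lo + clampI (hi - lo) q, hi) := by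
        simp only [stepB, hpar, if_pos, clampI]
      rw [hA, hB]
      have hc0 := clampI_nonneg (hi - lo) q hn
      have hcl := clampI_le (hi - lo) q hn
      exact ih (s + 1) arr (lo + clampI (hi - lo) q) hi (by omega) (by omega) h2
    · have hA : stepA (PySem.List.slice arr (some lo) (some hi)) (s, q)
          = PySem.List.slice arr (some lo) (some (lo + clampI (hi - lo) (q + 1))) := by
        simp only [stepA, hpar, if_false]
        exact step_even arr lo hi (q + 1) h0 h1 h2
      have hB : stepB (lo, hi) (s, q) = (lo, lo + clampI (hi - lo) (q + 1)) := by
        simp only [stepB, hpar, if_false, clampI]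
      rw [hA, hB]
      have hc0 := clampI_nonneg (hi - lo) (q + 1) hn
      have hcl := clampI_le (hi - lo) (q + 1) hn
      exact ih (s + 1) arr lo (lo + clampI (hi - lo) (q + 1)) h0 (by omega) (by omega)

-- A's fold over range(len(query)) with query[i] is the fold of stepA over enumerate(query)
lemma solution_eq_enum (arr query : List Int) :
    solution arr query = (PySem.List.enumerate query 0).foldl stepA arr := by
  unfold solution
  rw [show (PySem.List.pyRange 0 (query.length : Int) 1)
        = (PySem.List.enumerate query 0).map Prod.fst by
      rw [PySem.List.map_fst_enumerate]; norm_num]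
  rw [List.foldl_map]
  apply PySem.List.foldl_congr_mem
  intro acc x hx
  rcases (PySem.List.mem_enumerate_iff query 0 x).1 hx with ⟨k, hk, rfl⟩
  simp only [stepA]
  have : PySem.List.pyGetD query ((0 : Int) + k) 0 = query[k] := by
    rw [show ((0 : Int) + k) = ((k : Nat) : Int) by omega]
    simp [PySem.List.pyGetD_natCast, List.getD_eq_getElem?_getD, hk]
  rw [this]

theorem solution_spec_aux (arr query : List Int) :
    solution arr query = solution_alt arr query := by
  rw [solution_eq_enum]
  show _ = PySem.List.slice arr
      (some ((PySem.List.enumerate query 0).foldl stepB (0, (arr.length : Int))).1)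
      (some ((PySem.List.enumerate query 0).foldl stepB (0, (arr.length : Int))).2)
  rw [← slice_full arr]
  rw [loop_eq query 0 arr 0 (arr.length : Int) le_rfl (by positivity) (by simp)]
  rw [slice_full]

-- ===== VERDICT (by name: the statement is the Claim_ definition above) =====
theorem solution_spec : Claim_equal_solution := by
  intro arr query _
  exact solution_spec_aux arr query
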